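-- pv_equiv track=rewrite | github.com/mils8545/aoc2015python | 15/main.py | scoreRecipe
-- ===== SOURCE A (Python) =====
-- def scoreRecipe(ingredients, recipe):
--     scoreTotal = 1
--     for i in range(len(ingredients[0]["stats"])-1):
--         ingredientTotal = 0
--         for j in range(len(recipe)):
--             ingredientTotal += recipe[j] * ingredients[j]["stats"][i]
--         scoreTotal *= ingredientTotal if ingredientTotal > 0 else 0
--     return scoreTotal
-- ===== SOURCE B (Python) =====
-- def scoreRecipe(ingredients, recipe):
--     n = len(ingredients[0]["stats"]) - 1
--     if n <= 0:
--         return 1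
--     totals = [0] * n
--     for amount, ingredient in zip(recipe, ingredients):
--         totals = [t + amount * s for t, s in zip(totals, ingredient["stats"])]
--     result = 1
--     for t in totals:
--         result *= t if t > 0 else 0
--     return result
-- ===== Notes on version B (the rewrite author's own statement) =====
-- stated objective: alternative
-- what changed: B transposes A's loop nest: instead of recomputing a full pass over the recipe for each property (property-outer, ingredient-inner), B makes one pass over the zipped recipe/ingredients accumulating a vector of per-property totals, then clamps and multiplies them in a separate reduction pass.
import Mathlib
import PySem

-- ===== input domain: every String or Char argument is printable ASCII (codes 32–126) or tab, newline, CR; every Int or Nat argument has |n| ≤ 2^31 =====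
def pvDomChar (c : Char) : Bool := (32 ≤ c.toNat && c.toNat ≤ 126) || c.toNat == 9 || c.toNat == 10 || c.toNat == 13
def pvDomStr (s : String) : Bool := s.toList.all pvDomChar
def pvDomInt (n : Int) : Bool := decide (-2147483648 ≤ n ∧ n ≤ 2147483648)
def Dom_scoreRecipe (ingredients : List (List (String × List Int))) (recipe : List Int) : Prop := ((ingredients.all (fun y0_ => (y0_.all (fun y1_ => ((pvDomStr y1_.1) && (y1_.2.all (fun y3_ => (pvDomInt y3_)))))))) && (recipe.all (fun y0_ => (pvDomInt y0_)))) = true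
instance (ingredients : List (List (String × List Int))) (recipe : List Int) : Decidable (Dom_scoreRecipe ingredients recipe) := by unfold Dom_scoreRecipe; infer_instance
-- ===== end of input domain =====

-- B transposes A's traversal: one pass over the ingredients accumulating a vector of
-- per-property totals, then a single clamp-and-multiply reduction (objective: alternative).

-- dict lookup d["stats"]: first match in the association list (total form; Pre_ guarantees isSome)
def pvStats (d : List (String × List Int)) : List Int := (List.lookup "stats" d).getD []

-- ===== PORT A =====
def scoreRecipe (ingredients : List (List (String × List Int))) (recipe : List Int) : Int :=
  (PySem.List.pyRange 0 ((pvStats (PySem.List.pyGetD ingredients 0 [])).length - 1) 1).foldl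
    (fun scoreTotal i =>
      let ingredientTotal : Int :=
        (PySem.List.pyRange 0 (recipe.length : Int) 1).foldl
          (fun t j =>
            t + PySem.List.pyGetD recipe j 0 *
                PySem.List.pyGetD (pvStats (PySem.List.pyGetD ingredients j [])) i 0) 0
      scoreTotal * (if ingredientTotal > 0 then ingredientTotal else 0)) 1

-- ===== PORT B =====
def scoreRecipe_alt (ingredients : List (List (String × List Int))) (recipe : List Int) : Int :=
  let n : Int := (pvStats (PySem.List.pyGetD ingredients 0 [])).length - 1
  if n ≤ 0 then 1
  else
    let totals : List Int :=
      (recipe.zip ingredients).foldl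
        (fun ts p => List.zipWith (fun t s => t + p.1 * s) ts (pvStats p.2))
        (List.replicate n.toNat 0)
    totals.foldl (fun r t => r * (if t > 0 then t else 0)) 1

-- ===== PRECONDITION & SPEC =====
-- Pre_ excludes exactly the inputs where Python A raises: empty ingredients or a first
-- ingredient without "stats" (IndexError/KeyError), and — when there are ≥ 2 properties —
-- a recipe longer than ingredients, a used ingredient without "stats", or one whose stats
-- list is too short for the property loop (IndexError/KeyError).
def Pre_scoreRecipe (ingredients : List (List (String × List Int))) (recipe : List Int) : Prop :=
  ingredients ≠ [] ∧
  (List.lookup "stats" (ingredients.getD 0 [])).isSome = true ∧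
  (2 ≤ (pvStats (ingredients.getD 0 [])).length →
    recipe.length ≤ ingredients.length ∧
    ∀ j < recipe.length,
      (List.lookup "stats" (ingredients.getD j [])).isSome = true ∧
      (pvStats (ingredients.getD 0 [])).length - 1 ≤ (pvStats (ingredients.getD j [])).length)
instance (ingredients : List (List (String × List Int))) (recipe : List Int) : Decidable (Pre_scoreRecipe ingredients recipe) := by unfold Pre_scoreRecipe; infer_instance

def pvWitness_scoreRecipe : (List (List (String × List Int))) × List Int :=
  ([[("stats", [2, 3, 1])], [("stats", [-1, 4, 2])]], [3, 5])

def Spec_scoreRecipe (ingredients : List (List (String × List Int))) (recipe : List Int) (out : Int) : Prop := out = scoreRecipe_alt ingredients recipe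
instance (ingredients : List (List (String × List Int))) (recipe : List Int) (out : Int) : Decidable (Spec_scoreRecipe ingredients recipe out) := by unfold Spec_scoreRecipe; infer_instance

-- ===== CLAIM (what is proved, stated in full; the proofs are below) =====
def Claim_equal_scoreRecipe : Prop := ∀ (ingredients : List (List (String × List Int))) (recipe : List Int), Dom_scoreRecipe ingredients recipe → Pre_scoreRecipe ingredients recipe → Spec_scoreRecipe ingredients recipe (scoreRecipe ingredients recipe)

-- ===== LEMMAS AND PROOFS =====

-- a multiply-accumulate loop is a product of a map
theorem foldl_mul_key {α : Type} (l : List α) (g : α → Int) (init : Int) :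
    l.foldl (fun r x => r * g x) init = init * (l.map g).prod := by
  induction l generalizing init with
  | nil => simp
  | cons x xs ih =>
    rw [List.foldl_cons, ih, List.map_cons, List.prod_cons, ← mul_assoc]

-- the zipped ingredient pass, re-indexed (recipe no longer than ingredients)
theorem zip_map_sum (recipe : List Int) (ing : List (List (String × List Int))) (k : Nat)
    (h : recipe.length ≤ ing.length) :
    ((recipe.zip ing).map (fun p => p.1 * (pvStats p.2).getD k 0)).sum
      = ((List.range recipe.length).map
          (fun j => recipe.getD j 0 * (pvStats (ing.getD j [])).getD k 0)).sum := by
  apply congrArg List.sum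
  apply List.ext_getElem
  · simp [List.length_zip]; omega
  · intro j hj1 hj2
    have hjr : j < recipe.length := by
      simp [List.length_zip] at hj1; omega
    have hji : j < ing.length := by omega
    simp [List.getElem_zip, List.getD_eq_getElem?_getD, hjr, hji]

-- any list is the table of its own entries
theorem eq_map_range_getD (l : List Int) :
    l = (List.range l.length).map (fun i => l.getD i 0) := by
  apply List.ext_getElem
  · simp
  · intro i h1 h2
    simp at h1
    simp [List.getD, h1]

-- the vector-accumulation loop, pointwise: length is preserved and entry i is the running sum
theorem totals_fold_length (L : List (Int × List (String × List Int))) (ts : List Int)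
    (hL : ∀ p ∈ L, ts.length ≤ (pvStats p.2).length) :
    (L.foldl (fun ts p => List.zipWith (fun t s => t + p.1 * s) ts (pvStats p.2)) ts).length
      = ts.length := by
  induction L generalizing ts with
  | nil => rfl
  | cons p L ih =>
    have h1 : ts.length ≤ (pvStats p.2).length := hL p (by simp)
    have hlen : (List.zipWith (fun t s => t + p.1 * s) ts (pvStats p.2)).length = ts.length := by
      simp [List.length_zipWith]; omega
    simp only [List.foldl_cons]
    rw [ih _ (by intro q hq; rw [hlen]; exact hL q (by simp [hq]))]
    exact hlen

theorem totals_fold_getD (L : List (Int × List (String × List Int))) (ts : List Int)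
    (hL : ∀ p ∈ L, ts.length ≤ (pvStats p.2).length) (i : Nat) (hi : i < ts.length) :
    (L.foldl (fun ts p => List.zipWith (fun t s => t + p.1 * s) ts (pvStats p.2)) ts).getD i 0
      = ts.getD i 0 + (L.map (fun p => p.1 * (pvStats p.2).getD i 0)).sum := by
  induction L generalizing ts with
  | nil => simp
  | cons p L ih =>
    have h1 : ts.length ≤ (pvStats p.2).length := hL p (by simp)
    have hlen : (List.zipWith (fun t s => t + p.1 * s) ts (pvStats p.2)).length = ts.length := by
      simp [List.length_zipWith]; omega
    simp only [List.foldl_cons, List.map_cons, List.sum_cons]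
    rw [ih _ (by intro q hq; rw [hlen]; exact hL q (by simp [hq])) (by omega)]
    have hz : (List.zipWith (fun t s => t + p.1 * s) ts (pvStats p.2)).getD i 0
        = ts.getD i 0 + p.1 * (pvStats p.2).getD i 0 := by
      have hi2 : i < (pvStats p.2).length := by omega
      simp [List.getD, hi, hi2]
    rw [hz]; ring

-- ===== VERDICT (by name: the statement is the Claim_ definition above) =====
theorem scoreRecipe_spec : Claim_equal_scoreRecipe := by
  intro ing recipe _ hPre
  obtain ⟨hne, hs0iss, hrest⟩ := hPre
  unfold Spec_scoreRecipe scoreRecipe scoreRecipe_alt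
  simp only [PySem.List.pyGetD_zero]
  by_cases hn : ((pvStats (ing.getD 0 [])).length : Int) - 1 ≤ 0
  · rw [PySem.List.pyRange_one_eq_nil hn, List.foldl_nil, if_pos hn]
  · have h2 : 2 ≤ (pvStats (ing.getD 0 [])).length := by omega
    obtain ⟨hlen, hstats⟩ := hrest h2
    set n : Nat := (pvStats (ing.getD 0 [])).length - 1 with hndef
    have hcast : ((pvStats (ing.getD 0 [])).length : Int) - 1 = (n : Int) := by omega
    rw [if_neg hn, hcast]
    have hzipL : (recipe.zip ing).length = recipe.length := by
      simp [List.length_zip]; omega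
    have hL : ∀ p ∈ recipe.zip ing,
        (List.replicate ((n : Int)).toNat (0 : Int)).length ≤ (pvStats p.2).length := by
      intro p hp
      obtain ⟨j, hj, hpe⟩ := List.getElem_of_mem hp
      have hjr : j < recipe.length := by rwa [hzipL] at hj
      have hji : j < ing.length := by omega
      have hb := (hstats j hjr).2
      rw [List.getD_eq_getElem _ _ hji] at hb
      rw [← hpe, List.getElem_zip]
      simpa using hb
    set totals : List Int :=
      (recipe.zip ing).foldl
        (fun ts p => List.zipWith (fun t s => t + p.1 * s) ts (pvStats p.2))
        (List.replicate ((n : Int)).toNat 0) with htotals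
    have hTlen : totals.length = n := by
      rw [htotals, totals_fold_length _ _ hL]; simp
    have hT : totals = (List.range n).map (fun i => totals.getD i 0) := by
      have h := eq_map_range_getD totals
      rw [hTlen] at h; exact h
    rw [PySem.List.pyRange_zero_nat n, List.foldl_map]
    simp only [foldl_mul_key, one_mul]
    conv_rhs => rw [hT, List.map_map]
    apply congrArg
    apply List.map_congr_left
    intro k hk
    have hkn : k < n := List.mem_range.mp hk
    have hS : (PySem.List.pyRange 0 (recipe.length : Int) 1).foldl
        (fun t j => t + PySem.List.pyGetD recipe j 0 *
          PySem.List.pyGetD (pvStats (PySem.List.pyGetD ing j [])) (k : Int) 0) 0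
        = totals.getD k 0 := by
      rw [PySem.List.foldl_add, zero_add, PySem.List.pyRange_zero_nat, List.map_map]
      rw [htotals, totals_fold_getD _ _ hL k (by simpa using hkn)]
      rw [zip_map_sum _ _ _ hlen]
      simp [Function.comp_def, PySem.List.pyGetD_natCast]
    simp only [Function.comp_def]
    rw [hS]
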